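-- pv_equiv track=rewrite | github.com/MoonGyu1/AlgorithmStudy | GimmeSpoon/programmers/2025programmerscodechallenge/round2/serverexpansion.py | solution
-- ===== SOURCE A (Python) =====
-- import collections
--
-- def solution(players, m, k):
--     num_expanded = 0
--     limit = m - 1
--     extra_servers = collections.deque()
--
--     for t, player in enumerate(players):
--         while len(extra_servers) > 0 and extra_servers[0] <= t:
--             extra_servers.popleft()
--             limit -= m
--         while limit < player:
--             num_expanded += 1
--             limit += m
--             extra_servers.append(t + k)
--
--     return num_expanded
-- ===== SOURCE B (Python) =====
-- import collections
--
-- def solution(players, m, k):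
--     total = 0
--     cap = m - 1
--     active = collections.deque()  # groups: (expiry, count)
--     for t, player in enumerate(players):
--         while active and active[0][0] <= t:
--             _, c = active.popleft()
--             cap -= c * m
--         if cap < player:
--             need = -((cap - player) // m)  # ceil((player - cap) / m)
--             total += need
--             cap += need * m
--             active.append((t + k, need))
--     return total
-- ===== Notes on version B (the rewrite author's own statement) =====
-- stated objective: alternative
-- what changed: Replaces A's one-expansion-at-a-time inner while loop (and one deque entry per expansion) by a single ceil-division that batches each time step's expansions into one grouped (expiry,count) deque entry.
import Mathlib
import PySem

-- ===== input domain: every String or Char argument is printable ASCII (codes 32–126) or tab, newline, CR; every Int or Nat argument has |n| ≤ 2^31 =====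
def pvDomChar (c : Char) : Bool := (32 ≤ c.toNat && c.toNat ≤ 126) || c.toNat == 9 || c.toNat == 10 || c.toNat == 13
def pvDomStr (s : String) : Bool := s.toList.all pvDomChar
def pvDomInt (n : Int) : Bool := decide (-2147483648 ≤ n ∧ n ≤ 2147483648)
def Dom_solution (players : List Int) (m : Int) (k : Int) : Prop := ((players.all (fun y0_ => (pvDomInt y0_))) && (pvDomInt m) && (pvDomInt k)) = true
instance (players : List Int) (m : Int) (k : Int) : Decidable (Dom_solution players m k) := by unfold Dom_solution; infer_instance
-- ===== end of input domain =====

-- B batches each time step's expansions with one ceil-division and one grouped (expiry,count)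
-- deque entry, instead of A's one-at-a-time inner while loop and per-expansion deque entries.

-- ===== PORT A =====
-- while len(extra_servers) > 0 and extra_servers[0] <= t: popleft; limit -= m
def popA (m t : Int) : List Int → Int → (List Int × Int)
  | [], limit => ([], limit)
  | s :: rest, limit => if s ≤ t then popA m t rest (limit - m) else (s :: rest, limit)

-- while limit < player: num += 1; limit += m; append (t+k).
-- 'added' collects the servers appended by this loop (all equal tk) with cons, and expandA
-- appends them once at the end: an O(1)-per-iteration rendering of deque.append.
-- The '0 < m' conjunct is a totality guard only: with m ≤ 0 and limit < player the Python
-- while loop never terminates (such inputs are excluded by Pre_solution).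
def expandAux (m p tk : Int) (limit num : Int) (added : List Int) : Int × Int × List Int :=
  if h : limit < p ∧ 0 < m then
    expandAux m p tk (limit + m) (num + 1) (tk :: added)
  else (limit, num, added)
termination_by (p - limit).toNat
decreasing_by omega

def expandA (m p tk : Int) (limit num : Int) (servers : List Int) : Int × Int × List Int :=
  let r := expandAux m p tk limit num []
  (r.1, r.2.1, servers ++ r.2.2.reverse)

def loopA (m k : Int) : List Int → Int → Int → Int → List Int → Int
  | [], _, num, _, _ => num
  | p :: rest, t, num, limit, servers =>
    let pr := popA m t servers limit
    let er := expandA m p (t + k) pr.2 num pr.1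
    loopA m k rest (t + 1) er.2.1 er.1 er.2.2

def solution (players : List Int) (m : Int) (k : Int) : Int :=
  loopA m k players 0 0 (m - 1) []

-- ===== PORT B =====
-- while active and active[0][0] <= t: (_, c) = popleft; cap -= c * m
def popB (m t : Int) : List (Int × Int) → Int → (List (Int × Int) × Int)
  | [], cap => ([], cap)
  | g :: rest, cap => if g.1 ≤ t then popB m t rest (cap - g.2 * m) else (g :: rest, cap)

def loopB (m k : Int) : List Int → Int → Int → Int → List (Int × Int) → Int
  | [], _, total, _, _ => total
  | p :: rest, t, total, cap, active =>
    let pr := popB m t active cap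
    if pr.2 < p then
      let need := -(PySem.Int.floordiv (pr.2 - p) m)
      loopB m k rest (t + 1) (total + need) (pr.2 + need * m) (pr.1 ++ [(t + k, need)])
    else loopB m k rest (t + 1) total pr.2 pr.1

def solution_alt (players : List Int) (m : Int) (k : Int) : Int :=
  loopB m k players 0 0 (m - 1) []

-- ===== PRECONDITION & SPEC =====
-- Pre_ excludes exactly the inputs where Python A diverges: with m ≤ 0, A's inner while loop
-- never terminates as soon as some player exceeds the (then never-changing) limit m - 1.
def Pre_solution (players : List Int) (m : Int) (k : Int) : Prop :=
  0 < m ∨ ∀ p ∈ players, p ≤ m - 1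
instance (players : List Int) (m : Int) (k : Int) : Decidable (Pre_solution players m k) := by
  unfold Pre_solution; infer_instance
def pvWitness_solution : List Int × Int × Int := ([3, 1, 4, 0, 6], 2, 2)

def Spec_solution (players : List Int) (m : Int) (k : Int) (out : Int) : Prop := out = solution_alt players m k
instance (players : List Int) (m : Int) (k : Int) (out : Int) : Decidable (Spec_solution players m k out) := by unfold Spec_solution; infer_instance

-- ===== CLAIM (what is proved, stated in full; the proofs are below) =====
def Claim_equal_solution : Prop := ∀ (players : List Int) (m : Int) (k : Int), Dom_solution players m k → Pre_solution players m k → Spec_solution players m k (solution players m k)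

-- ===== LEMMAS AND PROOFS =====

-- A's per-expansion deque holds, for each group (e, c) of B's deque, c copies of e.
def flat (active : List (Int × Int)) : List Int :=
  active.flatMap (fun g => List.replicate g.2.toNat g.1)

theorem flat_cons (g : Int × Int) (rest : List (Int × Int)) :
    flat (g :: rest) = List.replicate g.2.toNat g.1 ++ flat rest := rfl

theorem popA_replicate (m t e : Int) (he : e ≤ t) :
    ∀ (n : Nat) (xs : List Int) (limit : Int),
      popA m t (List.replicate n e ++ xs) limit = popA m t xs (limit - n * m) := by
  intro n
  induction n with
  | zero => intro xs limit; simp [popA]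
  | succ n ih =>
    intro xs limit
    simp only [List.replicate_succ, List.cons_append, popA, if_pos he, ih]
    congr 1
    push_cast
    ring

theorem popA_popB (m t : Int) :
    ∀ (active : List (Int × Int)) (cap : Int),
      (∀ g ∈ active, 1 ≤ g.2) →
      popA m t (flat active) cap = ((flat (popB m t active cap).1), (popB m t active cap).2)
        ∧ ∀ g ∈ (popB m t active cap).1, 1 ≤ g.2 := by
  intro active
  induction active with
  | nil => intro cap _; simp [flat, popA, popB]
  | cons g rest ih =>
    intro cap hg
    have hg1 : 1 ≤ g.2 := hg g (List.mem_cons_self)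
    have hrest : ∀ x ∈ rest, 1 ≤ x.2 := fun x hx => hg x (List.mem_cons_of_mem _ hx)
    by_cases ht : g.1 ≤ t
    · rw [flat_cons]
      rw [popA_replicate m t g.1 ht]
      have hcast : (g.2.toNat : Int) = g.2 := Int.toNat_of_nonneg (by omega)
      rw [hcast]
      simp only [popB, if_pos ht]
      exact ih (cap - g.2 * m) hrest
    · have hn : g.2.toNat = g.2.toNat - 1 + 1 := by omega
      rw [flat_cons]
      conv_lhs => rw [hn, List.replicate_succ]
      simp only [List.cons_append, popA, if_neg ht, popB]
      refine ⟨?_, hg⟩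
      rw [flat_cons]
      conv_rhs => rw [hn, List.replicate_succ]
      simp

-- the number of expansions A's inner loop performs at one step, as B computes it
def need (m p cap : Int) : Int := -(PySem.Int.floordiv (cap - p) m)

theorem need_bounds (m p cap : Int) (hm : 0 < m) :
    cap + (need m p cap - 1) * m < p ∧ p ≤ cap + need m p cap * m := by
  have he : -(p - cap) = cap - p := by ring
  have h := (PySem.Int.neg_floordiv_neg_eq_iff_of_pos (a := p - cap) (b := m)
    (q := need m p cap) hm).mp (by unfold need; rw [he])
  exact ⟨by linarith [h.1], by linarith [h.2]⟩

theorem need_succ (m p cap : Int) (hm : 0 < m) :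
    need m p (cap + m) = need m p cap - 1 := by
  unfold need
  rw [PySem.Int.floordiv_eq_ediv_of_pos hm, PySem.Int.floordiv_eq_ediv_of_pos hm]
  have : cap + m - p = (cap - p) + 1 * m := by ring
  rw [this, Int.add_mul_ediv_right _ _ (ne_of_gt hm)]
  ring

theorem expandAux_closed (m p tk : Int) (hm : 0 < m) :
    ∀ (limit num : Int) (added : List Int),
      expandAux m p tk limit num added =
        if limit < p then
          (limit + need m p limit * m, num + need m p limit,
            List.replicate (need m p limit).toNat tk ++ added)
        else (limit, num, added) := by
  intro limit num added
  induction limit, num, added using expandAux.induct m p tk with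
  | case1 limit num added hcond ih =>
    have hlt : limit < p := hcond.1
    rw [expandAux, dif_pos hcond, ih]
    rw [if_pos hlt]
    have hb := need_bounds m p limit hm
    have hq1 : 1 ≤ need m p limit := by nlinarith [hb.1, hb.2]
    have hsucc := need_succ m p limit hm
    have htn : (need m p limit).toNat = (need m p limit - 1).toNat + 1 := by omega
    by_cases h2 : limit + m < p
    · rw [if_pos h2, hsucc]
      simp only [Prod.mk.injEq]
      refine ⟨by ring, by ring, ?_⟩
      rw [htn, List.replicate_succ']
      simp
    · rw [if_neg h2]
      have hq : need m p limit = 1 := by nlinarith [hb.1, hb.2]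
      rw [hq]
      simp only [Prod.mk.injEq]
      refine ⟨by ring, ?_⟩
      simp
  | case2 limit num added h =>
    rw [expandAux, dif_neg h]
    rw [if_neg (fun hlt => h ⟨hlt, hm⟩)]

theorem expandA_closed (m p tk : Int) (hm : 0 < m) :
    ∀ (limit num : Int) (servers : List Int),
      expandA m p tk limit num servers =
        if limit < p then
          (limit + need m p limit * m, num + need m p limit,
            servers ++ List.replicate (need m p limit).toNat tk)
        else (limit, num, servers) := by
  intro limit num servers
  unfold expandA
  rw [expandAux_closed m p tk hm]
  by_cases hlt : limit < p
  · rw [if_pos hlt, if_pos hlt]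
    simp
  · rw [if_neg hlt, if_neg hlt]
    simp

theorem loop_eq_pos (m k : Int) (hm : 0 < m) :
    ∀ (ps : List Int) (t num cap : Int) (active : List (Int × Int)),
      (∀ g ∈ active, 1 ≤ g.2) →
      loopA m k ps t num cap (flat active) = loopB m k ps t num cap active := by
  intro ps
  induction ps with
  | nil => intro t num cap active _; rfl
  | cons p rest ih =>
    intro t num cap active hg
    have hpop := popA_popB m t active cap hg
    simp only [loopA, loopB, hpop.1, expandA_closed m p (t + k) hm]
    set cap' := (popB m t active cap).2 with hc
    set active' := (popB m t active cap).1 with ha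
    by_cases hlt : cap' < p
    · rw [if_pos hlt, if_pos hlt]
      have hb := need_bounds m p cap' hm
      have hq1 : 1 ≤ need m p cap' := by nlinarith [hb.1, hb.2]
      have hflat : flat active' ++ List.replicate (need m p cap').toNat (t + k)
          = flat (active' ++ [(t + k, need m p cap')]) := by
        simp [flat]
      have hgroups : ∀ g ∈ active' ++ [(t + k, need m p cap')], 1 ≤ g.2 := by
        intro g hgm
        rcases List.mem_append.mp hgm with h1 | h1
        · exact hpop.2 g h1
        · rw [List.mem_singleton] at h1
          subst h1
          exact hq1
      show loopA m k rest (t + 1) (num + need m p cap') (cap' + need m p cap' * m)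
            (flat active' ++ List.replicate (need m p cap').toNat (t + k)) = _
      rw [hflat]
      exact ih _ _ _ _ hgroups
    · rw [if_neg hlt, if_neg hlt]
      exact ih _ _ _ _ hpop.2

theorem loop_eq_trivial (m k : Int) (hm : ¬ 0 < m) :
    ∀ (ps : List Int), (∀ p ∈ ps, p ≤ m - 1) → ∀ (t num : Int),
      loopA m k ps t num (m - 1) [] = num ∧ loopB m k ps t num (m - 1) [] = num := by
  intro ps
  induction ps with
  | nil => intro _ t num; exact ⟨rfl, rfl⟩
  | cons p rest ih =>
    intro hp t num
    have hple : p ≤ m - 1 := hp p (List.mem_cons_self)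
    have hrest : ∀ q ∈ rest, q ≤ m - 1 := fun q hq => hp q (List.mem_cons_of_mem _ hq)
    have hnot : ¬ (m - 1 < p) := by omega
    constructor
    · simp only [loopA, popA, expandA]
      rw [expandAux, dif_neg (show ¬(m - 1 < p ∧ 0 < m) by tauto)]
      simpa using (ih hrest (t + 1) num).1
    · simp only [loopB, popB]
      rw [if_neg hnot]
      exact (ih hrest (t + 1) num).2

-- ===== VERDICT (by name: the statement is the Claim_ definition above) =====
theorem solution_spec : Claim_equal_solution := by
  intro players m k _ hpre
  unfold Spec_solution solution solution_alt
  rcases hpre with hm | hall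
  · have := loop_eq_pos m k hm players 0 0 (m - 1) [] (by simp)
    simpa [flat] using this
  · by_cases hm : 0 < m
    · have := loop_eq_pos m k hm players 0 0 (m - 1) [] (by simp)
      simpa [flat] using this
    · rw [(loop_eq_trivial m k hm players hall 0 0).1,
          (loop_eq_trivial m k hm players hall 0 0).2]
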